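-- pv_equiv track=rewrite | github.com/chdgriff/Batch-File-Rename | Adjust File Numbers.py | findDigitCount
-- ===== SOURCE A (Python) =====
-- def findDigitCount(subString):
--     digits = 0
--     for i in range(len(subString)-1,-1,-1):
--         if subString[i] == '#':
--             digits += 1
--         else:
--             break
--     return digits
-- ===== SOURCE B (Python) =====
-- def findDigitCount(subString):
--     return len(subString) - len(subString.rstrip('#'))
-- ===== Notes on version B (the rewrite author's own statement) =====
-- stated objective: idiomatic
-- what changed: Replaces the explicit reverse index loop with break by a single expression that strips trailing '#' with rstrip('#') and returns the length difference.
import Mathlib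
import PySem

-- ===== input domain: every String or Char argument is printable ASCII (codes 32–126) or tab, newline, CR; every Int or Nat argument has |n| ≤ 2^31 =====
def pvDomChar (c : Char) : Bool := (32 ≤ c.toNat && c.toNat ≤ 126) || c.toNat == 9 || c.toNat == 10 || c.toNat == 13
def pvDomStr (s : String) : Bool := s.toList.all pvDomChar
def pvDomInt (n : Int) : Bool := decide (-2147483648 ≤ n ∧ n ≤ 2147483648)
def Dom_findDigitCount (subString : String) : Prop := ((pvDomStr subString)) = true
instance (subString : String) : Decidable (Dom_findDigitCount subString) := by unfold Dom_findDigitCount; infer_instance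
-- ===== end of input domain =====

-- B replaces A's reverse index loop with break by len(s) - len(s.rstrip('#')) (idiomatic one-liner).

-- ===== PORT A =====
-- the 'for i in range(len(subString)-1,-1,-1): … break' loop; indices visited are always in range,
-- so subString[i] is ported with pyGetD (the default is never read)
def findDigitCountLoop (cs : List Char) : List Int → Int → Int
  | [], digits => digits
  | i :: rest, digits =>
    if PySem.List.pyGetD cs i ' ' == '#' then findDigitCountLoop cs rest (digits + 1)
    else digits

def findDigitCount (subString : String) : Int :=
  findDigitCountLoop subString.toList
    (PySem.List.pyRange (PySem.Str.len subString - 1) (-1) (-1)) 0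

-- ===== PORT B =====
-- len(subString) - len(subString.rstrip('#')); rstrip('#') is hand-ported exactly:
-- dropping trailing '#' characters = reverse ∘ dropWhile (· == '#') ∘ reverse
def findDigitCount_alt (subString : String) : Int :=
  PySem.Str.len subString
    - ((subString.toList.reverse.dropWhile (fun c => c == '#')).reverse.length : Int)

-- ===== PRECONDITION & SPEC =====
def Spec_findDigitCount (subString : String) (out : Int) : Prop := out = findDigitCount_alt subString
instance (subString : String) (out : Int) : Decidable (Spec_findDigitCount subString out) := by unfold Spec_findDigitCount; infer_instance

-- ===== CLAIM (what is proved, stated in full; the proofs are below) =====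
def Claim_equal_findDigitCount : Prop := ∀ (subString : String), Dom_findDigitCount subString → Spec_findDigitCount subString (findDigitCount subString)

-- ===== LEMMAS AND PROOFS =====

-- A's countdown loop counts the trailing-'#' prefix of the reversed first k characters
lemma findDigitCountLoop_eq (cs : List Char) :
    ∀ (k : Nat), k ≤ cs.length → ∀ (d : Int),
      findDigitCountLoop cs (PySem.List.pyRange ((k : Int) - 1) (-1) (-1)) d
        = d + (((cs.take k).reverse.takeWhile (fun c => c == '#')).length : Int) := by
  intro k
  induction k with
  | zero =>
    intro _ d
    rw [PySem.List.pyRange_neg_one_eq_nil (by norm_num)]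
    simp [findDigitCountLoop]
  | succ k ih =>
    intro hk d
    have hklt : k < cs.length := by omega
    have : ((k + 1 : Nat) : Int) - 1 = (k : Int) := by push_cast; ring
    rw [this, PySem.List.pyRange_neg_one_cons (by omega)]
    have hget : PySem.List.pyGetD cs (k : Int) ' ' = cs[k] := by
      simp [List.getD_eq_getElem?_getD, hklt]
    have htake : (cs.take (k + 1)).reverse = cs[k] :: (cs.take k).reverse := by
      rw [List.take_add_one]
      simp [hklt]
    simp only [findDigitCountLoop, hget, htake, List.takeWhile]
    by_cases hc : cs[k] == '#'
    · simp only [hc, ih (by omega) (d + 1), List.length_cons]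
      push_cast; ring
    · simp [hc]

theorem findDigitCount_spec : Claim_equal_findDigitCount := by
  intro s _
  unfold Spec_findDigitCount findDigitCount findDigitCount_alt
  have hlen : PySem.Str.len s = (s.toList.length : Int) := by
    simp [PySem.Str.len]
  rw [hlen, findDigitCountLoop_eq s.toList s.toList.length le_rfl 0]
  have hsum : ((s.toList.reverse.takeWhile (fun c => c == '#')).length : Int)
      + ((s.toList.reverse.dropWhile (fun c => c == '#')).length : Int)
      = (s.toList.length : Int) := by
    have h : (s.toList.reverse.takeWhile (fun c => c == '#')).length
        + (s.toList.reverse.dropWhile (fun c => c == '#')).length = s.toList.length := by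
      have h2 := congrArg List.length
        (List.takeWhile_append_dropWhile (p := fun c => c == '#') (l := s.toList.reverse))
      rw [List.length_append, List.length_reverse] at h2
      exact h2
    push_cast [← h]
    ring
  simp only [List.take_length, List.length_reverse]
  omega
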